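-- pv_equiv track=rewrite | github.com/anirudh-tyagi/AP_final_assignment | codes/ps2/10.py | moveDups
-- ===== SOURCE A (Python) =====
-- def moveDups(s):
--     result = []
--     for i in range(len(s)):
--         found = False
--         for j in range(len(result)):
--             if result[j][0] == s[i]:
--                 result[j] += s[i]
--                 found = True
--                 break
--         if not found:
--             result.append(s[i])
--     return result
-- ===== SOURCE B (Python) =====
-- def moveDups(s):
--     return [c * s.count(c) for c in sorted(set(s), key=s.index)]
-- ===== Notes on version B (the rewrite author's own statement) =====
-- stated objective: simpler
-- what changed: Replaces the incremental scan-existing-buckets grouping with a one-liner: distinct characters ordered by first occurrence (sorted(set(s), key=s.index)), each group rebuilt independently as c * s.count(c).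
import Mathlib
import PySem

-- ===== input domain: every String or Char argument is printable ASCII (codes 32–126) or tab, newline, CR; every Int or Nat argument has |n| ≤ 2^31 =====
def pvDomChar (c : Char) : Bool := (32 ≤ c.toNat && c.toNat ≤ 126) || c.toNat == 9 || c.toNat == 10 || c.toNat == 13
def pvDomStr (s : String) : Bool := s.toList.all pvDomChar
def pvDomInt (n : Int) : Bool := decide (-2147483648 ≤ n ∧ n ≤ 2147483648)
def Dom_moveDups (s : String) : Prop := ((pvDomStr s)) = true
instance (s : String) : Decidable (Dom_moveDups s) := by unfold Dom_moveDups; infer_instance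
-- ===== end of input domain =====

-- B groups equal characters by first-occurrence order via sorted(set(s), key=s.index) and
-- rebuilds each group independently as c * s.count(c); simpler than A's bucket-scanning loop.

-- ===== PORT A =====
-- the inner `for j in range(len(result))` scan: append c to the first bucket whose first char
-- is c; if no bucket matches, append a new one-char bucket (buckets as List Char, packed at the end)
def placeChar : List (List Char) → Char → List (List Char)
  | [], c => [[c]]
  | b :: rest, c => if b[0]? = some c then (b ++ [c]) :: rest else b :: placeChar rest c

def moveDups (s : String) : List String :=
  (s.toList.foldl placeChar []).map (fun b => String.ofList b)

-- ===== PORT B =====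
-- [c * s.count(c) for c in sorted(set(s), key=s.index)]
def moveDups_alt (s : String) : List String :=
  (PySem.List.sorted (PySem.Set.ofList s.toList)
      (fun c => PySem.Chars.find s.toList [c])).map
    (fun c => String.ofList (List.replicate (PySem.Chars.count s.toList [c]) c))

-- ===== PRECONDITION & SPEC =====
def Spec_moveDups (s : String) (out : List String) : Prop := out = moveDups_alt s
instance (s : String) (out : List String) : Decidable (Spec_moveDups s out) := by unfold Spec_moveDups; infer_instance

-- ===== CLAIM (what is proved, stated in full; the proofs are below) =====
def Claim_equal_moveDups : Prop := ∀ (s : String), Dom_moveDups s → Spec_moveDups s (moveDups s)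

-- ===== LEMMAS AND PROOFS =====

-- count.go with a singleton pattern counts occurrences
lemma count_go_singleton (c : Char) :
    ∀ (l : List Char) (fuel acc : Nat), l.length ≤ fuel →
      PySem.Chars.count.go [c] fuel l acc = acc + l.count c := by
  intro l
  induction l with
  | nil => intro fuel acc _; cases fuel <;> simp [PySem.Chars.count.go]
  | cons h t ih =>
      intro fuel acc hle
      cases fuel with
      | zero => simp at hle
      | succ n =>
          by_cases hc : c = h
          · subst hc
            rw [show PySem.Chars.count.go [c] (n+1) (c :: t) acc
                  = PySem.Chars.count.go [c] n (List.drop [c].length (c :: t)) (acc + 1) from by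
                  simp [PySem.Chars.count.go, List.isPrefixOf]]
            simp only [List.length_cons, List.length_nil, Nat.zero_add, List.drop_succ_cons,
              List.drop_zero]
            rw [ih n (acc + 1) (by simpa using hle)]
            simp [List.count_cons]
            omega
          · rw [show PySem.Chars.count.go [c] (n+1) (h :: t) acc
                  = PySem.Chars.count.go [c] n t acc from by
                  simp [PySem.Chars.count.go, List.isPrefixOf, hc]]
            rw [ih n acc (by simpa using hle)]
            simp [List.count_cons]
            intro h'; exact absurd h'.symm hc

lemma count_singleton (cs : List Char) (c : Char) :
    PySem.Chars.count cs [c] = cs.count c := by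
  simp [PySem.Chars.count, count_go_singleton c cs cs.length 0 le_rfl]

-- [c] is a prefix of l iff l starts with c
lemma singleton_prefix_iff (c : Char) (l : List Char) : [c] <+: l ↔ l[0]? = some c := by
  cases l with
  | nil => simp
  | cons h t =>
      constructor
      · rintro ⟨u, hu⟩; simp at hu; simp [hu.1]
      · intro h'; simp at h'; exact ⟨t, by simp [h']⟩

-- find with a singleton pattern is idxOf (for present characters)
lemma find_singleton (cs : List Char) (c : Char) (h : c ∈ cs) :
    PySem.Chars.find cs [c] = (cs.idxOf c : Int) := by
  have hinf : [c] <:+: cs := by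
    obtain ⟨u, v, rfl⟩ := List.append_of_mem h
    exact ⟨u, v, by simp⟩
  have hnn : 0 ≤ PySem.Chars.find cs [c] := (PySem.Chars.find_nonneg_iff cs [c]).mpr hinf
  obtain ⟨hpre, hmin⟩ := PySem.Chars.find_spec hnn
  set k := (PySem.Chars.find cs [c]).toNat with hkdef
  have hk : cs[k]? = some c := by
    have := (singleton_prefix_iff c (cs.drop k)).mp hpre
    simpa [List.getElem?_drop] using this
  obtain ⟨hklt, hkget⟩ := List.getElem?_eq_some_iff.mp hk
  have hidx_le : cs.idxOf c ≤ k := by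
    have hlen : k < (List.take (k + 1) cs).length := by
      simp [List.length_take]; omega
    have hmemtake : c ∈ cs.take (k + 1) := by
      have : (cs.take (k + 1))[k]'hlen = c := by
        rw [List.getElem_take]; exact hkget
      exact this ▸ List.getElem_mem hlen
    have := (List.mem_take_iff_idxOf_lt h).mp hmemtake
    omega
  have hk_le : k ≤ cs.idxOf c := by
    by_contra hlt
    push_neg at hlt
    have hmem : cs.idxOf c < cs.length := List.idxOf_lt_length_of_mem h
    refine hmin _ hlt ((singleton_prefix_iff c _).mpr ?_)
    rw [List.getElem?_drop]
    simp only [Nat.add_zero]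
    rw [List.getElem?_eq_some_iff]
    exact ⟨hmem, List.getElem_idxOf hmem⟩
  have := Int.toNat_of_nonneg hnn
  omega

lemma ofList_append_singleton (cs : List Char) (c : Char) :
    PySem.Set.ofList (cs ++ [c]) =
      if c ∈ PySem.Set.ofList cs then PySem.Set.ofList cs
      else PySem.Set.ofList cs ++ [c] := by
  simp [PySem.Set.ofList, List.foldl_append, PySem.Set.add]

-- first-occurrence order: ofList is strictly increasing in idxOf
lemma pairwise_idxOf (cs : List Char) :
    List.Pairwise (fun a b => cs.idxOf a < cs.idxOf b) (PySem.Set.ofList cs) := by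
  induction cs using List.reverseRecOn with
  | nil => simp [PySem.Set.ofList, PySem.Set.empty]
  | append_singleton cs c ih =>
      rw [ofList_append_singleton]
      have hmemof : ∀ x, x ∈ PySem.Set.ofList cs ↔ x ∈ cs := fun x => PySem.Set.mem_ofList cs x
      split_ifs with hc
      · refine ih.imp_of_mem ?_
        intro a b ha hb hab
        rwa [List.idxOf_append_of_mem ((hmemof a).mp ha),
             List.idxOf_append_of_mem ((hmemof b).mp hb)]
      · rw [List.pairwise_append]
        refine ⟨ih.imp_of_mem ?_, ?_, ?_⟩
        · intro a b ha hb hab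
          rwa [List.idxOf_append_of_mem ((hmemof a).mp ha),
               List.idxOf_append_of_mem ((hmemof b).mp hb)]
        · simp
        · intro a ha b hb
          simp only [List.mem_singleton] at hb
          subst hb
          rw [List.idxOf_append_of_mem ((hmemof a).mp ha),
              List.idxOf_append_of_notMem (fun h => hc ((hmemof b).mpr h))]
          have h1 : cs.idxOf a < cs.length := List.idxOf_lt_length_of_mem ((hmemof a).mp ha)
          have h2 : List.idxOf b [b] = 0 := by simp
          omega

-- scanning buckets of the shape `replicate (g d) d` for nodup ds
lemma place_buckets (g : Char → Nat) (ds : List Char) (hnd : ds.Nodup)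
    (hpos : ∀ d ∈ ds, 0 < g d) (c : Char) :
    placeChar (ds.map (fun d => List.replicate (g d) d)) c =
      if c ∈ ds then ds.map (fun d => List.replicate (if d = c then g d + 1 else g d) d)
      else ds.map (fun d => List.replicate (g d) d) ++ [[c]] := by
  induction ds with
  | nil => simp [placeChar]
  | cons d ds ih =>
      have hdpos : 0 < g d := hpos d (by simp)
      have hhead : (List.replicate (g d) d)[0]? = some d := by
        rw [List.getElem?_eq_some_iff]
        exact ⟨by simpa using hdpos, by simp⟩
      simp only [List.map_cons, placeChar, hhead]
      by_cases hdc : d = c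
      · subst hdc
        rw [if_pos rfl, if_pos (by simp)]
        simp only [List.map_cons, if_pos rfl]
        rw [← List.replicate_succ' (n := g d)]
        congr 1
        refine (List.map_congr_left ?_).symm
        intro x hx
        have hxne : x ≠ d := fun h => (List.nodup_cons.mp hnd).1 (h ▸ hx)
        rw [if_neg hxne]
      · rw [if_neg (fun h => hdc (Option.some_injective _ h))]
        rw [ih (List.nodup_cons.mp hnd).2 (fun x hx => hpos x (by simp [hx]))]
        by_cases hc : c ∈ ds
        · rw [if_pos hc, if_pos (by simp [hc])]
          simp [if_neg hdc]
        · have hcd : c ∉ d :: ds := by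
            simp only [List.mem_cons, not_or]
            exact ⟨fun h => hdc h.symm, hc⟩
          rw [if_neg hc, if_neg hcd]
          simp

-- the loop invariant of A: after processing p, the buckets are one replicate-group per
-- distinct char of p in first-occurrence order
lemma foldA (cs : List Char) : ∀ (p : List Char),
    List.foldl placeChar ((PySem.Set.ofList p).map (fun d => List.replicate (p.count d) d)) cs
      = (PySem.Set.ofList (p ++ cs)).map (fun d => List.replicate ((p ++ cs).count d) d) := by
  induction cs with
  | nil => intro p; simp
  | cons c cs ih =>
      intro p
      have hstep : placeChar ((PySem.Set.ofList p).map (fun d => List.replicate (p.count d) d)) c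
          = (PySem.Set.ofList (p ++ [c])).map
              (fun d => List.replicate ((p ++ [c]).count d) d) := by
        rw [place_buckets p.count (PySem.Set.ofList p) (PySem.Set.nodup_ofList p)
              (fun d hd => List.count_pos_iff.mpr ((PySem.Set.mem_ofList p d).mp hd)) c,
            ofList_append_singleton]
        by_cases hc : c ∈ PySem.Set.ofList p
        · rw [if_pos hc, if_pos hc]
          refine List.map_congr_left ?_
          intro d hd
          by_cases hdc : d = c
          · subst hdc; simp [List.count_append]
          · simp [List.count_append, hdc, Ne.symm hdc]
        · rw [if_neg hc, if_neg hc, List.map_append]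
          congr 1
          · refine List.map_congr_left ?_
            intro d hd
            have hdc : d ≠ c := fun h => hc (h ▸ hd)
            simp [List.count_append, Ne.symm hdc]
          · have hcp : c ∉ p := fun h => hc ((PySem.Set.mem_ofList p c).mpr h)
            simp [List.count_append, List.count_eq_zero.mpr hcp]
      rw [List.foldl_cons, hstep, ih (p ++ [c])]
      simp

-- ===== VERDICT (by name: the statement is the Claim_ definition above) =====
theorem moveDups_spec : Claim_equal_moveDups := by
  intro s _
  unfold Spec_moveDups moveDups moveDups_alt
  set cs := s.toList with hcs
  have hfold : cs.foldl placeChar []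
      = (PySem.Set.ofList cs).map (fun d => List.replicate (cs.count d) d) := by
    have := foldA cs []
    simpa [PySem.Set.ofList, PySem.Set.empty] using this
  have hsorted : PySem.List.sorted (PySem.Set.ofList cs)
      (fun c => PySem.Chars.find cs [c]) = PySem.Set.ofList cs := by
    refine PySem.List.sorted_eq_of_perm_of_pairwise_lt _ _ _ List.Perm.rfl ?_
    refine (pairwise_idxOf cs).imp_of_mem ?_
    intro a b ha hb hab
    rw [find_singleton cs a ((PySem.Set.mem_ofList cs a).mp ha),
        find_singleton cs b ((PySem.Set.mem_ofList cs b).mp hb)]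
    exact_mod_cast hab
  rw [hfold, hsorted, List.map_map]
  refine List.map_congr_left ?_
  intro d hd
  simp [count_singleton]
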